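-- pv_equiv track=rewrite | github.com/Explore31/AI-Legal-Chatbot | app.py | find_relevant_legal_info
-- ===== SOURCE A (Python) =====
-- def find_relevant_legal_info(description, legal_data):
--     keywords = description.lower().split()
--     matching_info = []
--     for entry in legal_data:
--         entry_text = entry.lower()
--         # Match all keywords (strict)
--         if all(keyword in entry_text for keyword in keywords):
--             matching_info.append(entry)
--     # You can alternatively implement logic for partial matches here
--     return matching_info
-- ===== SOURCE B (Python) =====
-- def find_relevant_legal_info(description, legal_data):
--     # Loop over keywords outside: each keyword filters the shrinking candidate list.
--     result = list(legal_data)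
--     for keyword in description.lower().split():
--         result = [e for e in result if keyword in e.lower()]
--     return result
-- ===== Notes on version B (the rewrite author's own statement) =====
-- stated objective: faster
-- what changed: Inverted loop nesting: instead of one pass over entries testing all() keywords per entry, B starts from the full list and performs one filtering pass per keyword over the progressively shrinking candidate list.
import Mathlib
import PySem

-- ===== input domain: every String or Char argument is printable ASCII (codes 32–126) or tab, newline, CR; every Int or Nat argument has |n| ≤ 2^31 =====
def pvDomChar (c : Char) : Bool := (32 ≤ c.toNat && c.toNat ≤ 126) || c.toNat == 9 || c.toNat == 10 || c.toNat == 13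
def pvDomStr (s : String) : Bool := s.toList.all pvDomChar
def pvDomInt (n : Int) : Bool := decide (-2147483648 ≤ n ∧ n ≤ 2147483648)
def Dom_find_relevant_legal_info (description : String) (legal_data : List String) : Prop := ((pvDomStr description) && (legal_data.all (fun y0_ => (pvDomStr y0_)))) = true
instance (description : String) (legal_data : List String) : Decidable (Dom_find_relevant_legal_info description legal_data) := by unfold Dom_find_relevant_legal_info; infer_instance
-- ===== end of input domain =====

-- B inverts the loop nesting: one filtering pass per keyword over the shrinking candidate list (alternative decomposition, same result).

-- ===== PORT A =====
def find_relevant_legal_info (description : String) (legal_data : List String) : List String :=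
  let keywords := PySem.Str.split₀ (PySem.Str.lower description)
  legal_data.foldl (fun matching_info entry =>
    let entry_text := PySem.Str.lower entry
    if keywords.all (fun keyword => PySem.Str.isIn keyword entry_text) then
      matching_info ++ [entry]
    else
      matching_info) []

-- ===== PORT B =====
def find_relevant_legal_info_alt (description : String) (legal_data : List String) : List String :=
  (PySem.Str.split₀ (PySem.Str.lower description)).foldl
    (fun result keyword => result.filter (fun e => PySem.Str.isIn keyword (PySem.Str.lower e)))
    legal_data

-- ===== PRECONDITION & SPEC =====
def Spec_find_relevant_legal_info (description : String) (legal_data : List String) (out : List String) : Prop := out = find_relevant_legal_info_alt description legal_data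
instance (description : String) (legal_data : List String) (out : List String) : Decidable (Spec_find_relevant_legal_info description legal_data out) := by unfold Spec_find_relevant_legal_info; infer_instance

-- ===== CLAIM (what is proved, stated in full; the proofs are below) =====
def Claim_equal_find_relevant_legal_info : Prop := ∀ (description : String) (legal_data : List String), Dom_find_relevant_legal_info description legal_data → Spec_find_relevant_legal_info description legal_data (find_relevant_legal_info description legal_data)

-- ===== LEMMAS AND PROOFS =====

-- Folding one filter per keyword equals one filter by the conjunction of all keywords.
theorem foldl_filter_eq_filter_all {α β : Type} (p : β → α → Bool) :
    ∀ (kws : List β) (l : List α),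
      kws.foldl (fun r k => r.filter (p k)) l = l.filter (fun e => kws.all (fun k => p k e)) := by
  intro kws
  induction kws with
  | nil => intro l; simp
  | cons k ks ih =>
    intro l
    simp only [List.foldl_cons, ih, List.filter_filter, List.all_cons]
    exact List.filter_congr (fun e _ => by rw [Bool.and_comm])

-- ===== VERDICT (by name: the statement is the Claim_ definition above) =====
theorem find_relevant_legal_info_spec : Claim_equal_find_relevant_legal_info := by
  intro description legal_data _
  unfold Spec_find_relevant_legal_info find_relevant_legal_info find_relevant_legal_info_alt
  rw [PySem.List.foldl_append_if_eq_filter, foldl_filter_eq_filter_all]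
  simp
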